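-- pv_equiv track=rewrite | github.com/PKUZHOU/ddz | game/card_util.py | get_shuangshun
-- ===== SOURCE A (Python) =====
-- def get_shuangshun(poker):
--     #获得双顺
--     shuangshun = []
--     keys = []
--     for key in poker.keys():
--         if key!=15 and poker[key]>=2: #不能有2 而且牌数不少于2张，结果放入kes[] 中
--             keys.append(key)
--
--     sorted(keys)
--     for i in range(3, 11): #双顺可能的总长度 (6-20)
--         for j in range(3, 16):#从3开始找i张
--             flag = True
--             for k in range(i):
--                 if not j + k in keys:
--                     flag = False
--             if flag == True:
--                 temp = []
--                 for x in range(i):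
--                     temp+=[x+j,x+j]
--                 shuangshun.append(temp)
--     return shuangshun
-- ===== SOURCE B (Python) =====
-- def get_shuangshun(poker):
--     # eligible ranks: at least a pair, never 2 (rank 15)
--     elig = {k for k in poker if k != 15 and poker[k] >= 2}
--     # run[r] = length of the consecutive eligible streak starting at rank r
--     # (dynamic programming downward; replaces A's per-(i,j) membership scans)
--     run = {}
--     for r in range(24, 2, -1):
--         if r in elig:
--             run[r] = run.get(r + 1, 0) + 1
--     res = []
--     for i in range(3, 11):
--         for j in range(3, 16):
--             if run.get(j, 0) >= i:
--                 res.append([v for k in range(i) for v in (j + k, j + k)])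
--     return res
-- ===== Notes on version B (the rewrite author's own statement) =====
-- stated objective: faster
-- what changed: Replaces A's per-(i,j) inner loop that scans the keys list for each of the i required ranks with a streak-length table computed once by downward dynamic programming (run[r] = 1 + run[r+1]), so each (i,j) candidate is decided by one O(1) lookup.
import Mathlib
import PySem

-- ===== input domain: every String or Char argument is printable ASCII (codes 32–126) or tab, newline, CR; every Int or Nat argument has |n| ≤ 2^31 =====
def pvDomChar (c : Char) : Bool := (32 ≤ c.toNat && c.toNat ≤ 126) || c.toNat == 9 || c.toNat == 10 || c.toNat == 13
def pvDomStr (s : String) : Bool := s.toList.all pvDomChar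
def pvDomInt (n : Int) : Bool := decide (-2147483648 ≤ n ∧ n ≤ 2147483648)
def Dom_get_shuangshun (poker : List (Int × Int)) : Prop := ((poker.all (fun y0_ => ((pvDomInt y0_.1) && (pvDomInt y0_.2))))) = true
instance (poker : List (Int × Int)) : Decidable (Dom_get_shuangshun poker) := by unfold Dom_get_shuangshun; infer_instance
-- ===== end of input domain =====

-- B replaces A's repeated membership scans by a streak-length table built once (objective: faster).
-- ===== PORT A =====
-- poker is a Python dict, received as an association list; the dict is rebuilt with Dict.ofList.
def get_shuangshun (poker : List (Int × Int)) : List (List Int) :=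
  let d := PySem.Dict.ofList poker
  -- keys loop: every key iterated is present in d, so poker[key] is total; getD is exact here
  let keys : List Int := d.keys.foldl
    (fun ks key => if key ≠ 15 ∧ d.getD key 0 ≥ 2 then ks ++ [key] else ks) []
  -- 'sorted(keys)' in A discards its result: a no-op, nothing to port
  (PySem.List.pyRange 3 11 1).foldl (fun acc i =>
    (PySem.List.pyRange 3 16 1).foldl (fun acc j =>
      let flag := (PySem.List.pyRange 0 i 1).foldl
        (fun flag k => if ¬ ((j + k) ∈ keys) then false else flag) true
      if flag = true then
        acc ++ [(PySem.List.pyRange 0 i 1).foldl (fun temp x => temp ++ [x + j, x + j]) []]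
      else acc) acc) []

-- ===== PORT B =====
def get_shuangshun_alt (poker : List (Int × Int)) : List (List Int) :=
  let d := PySem.Dict.ofList poker
  let elig : PySem.Set Int :=
    PySem.Set.ofList (d.keys.filter (fun k => decide (k ≠ 15 ∧ d.getD k 0 ≥ 2)))
  let run : PySem.Dict Int Int := (PySem.List.pyRange 24 2 (-1)).foldl
    (fun run r => if r ∈ elig then run.insert r (run.getD (r + 1) 0 + 1) else run)
    PySem.Dict.empty
  (PySem.List.pyRange 3 11 1).foldl (fun res i =>
    (PySem.List.pyRange 3 16 1).foldl (fun res j =>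
      if run.getD j 0 ≥ i then
        res ++ [(PySem.List.pyRange 0 i 1).flatMap (fun k => [j + k, j + k])]
      else res) res) []

-- ===== PRECONDITION & SPEC =====
def Spec_get_shuangshun (poker : List (Int × Int)) (out : List (List Int)) : Prop := out = get_shuangshun_alt poker
instance (poker : List (Int × Int)) (out : List (List Int)) : Decidable (Spec_get_shuangshun poker out) := by unfold Spec_get_shuangshun; infer_instance

-- ===== CLAIM (what is proved, stated in full; the proofs are below) =====
def Claim_equal_get_shuangshun : Prop := ∀ (poker : List (Int × Int)), Dom_get_shuangshun poker → Spec_get_shuangshun poker (get_shuangshun poker)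

-- ===== LEMMAS AND PROOFS =====

-- streak length starting at r, counted with fuel n (mathematical characterisation of B's run table)
def reachAux (elig : List Int) : Nat → Int → Int
  | 0, _ => 0
  | n+1, r => if r ∈ elig then reachAux elig n (r+1) + 1 else 0

def reach (elig : List Int) (r : Int) : Int := reachAux elig (25 - r).toNat r

theorem reachAux_nonneg (elig : List Int) (n : Nat) (r : Int) : 0 ≤ reachAux elig n r := by
  induction n generalizing r with
  | zero => simp [reachAux]
  | succ m ih =>
    simp only [reachAux]
    split_ifs with h
    · have := ih (r+1); omega
    · omega

theorem reach_eq_zero_of_gt (elig : List Int) (r : Int) (h : 24 < r) : reach elig r = 0 := by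
  unfold reach
  have : (25 - r).toNat = 0 := by omega
  simp [this, reachAux]

theorem reach_unfold (elig : List Int) (r : Int) (h : r ≤ 24) :
    reach elig r = if r ∈ elig then reach elig (r+1) + 1 else 0 := by
  unfold reach
  have : (25 - r).toNat = (25 - (r+1)).toNat + 1 := by omega
  rw [this]
  simp [reachAux]

theorem reachAux_ge_iff (elig : List Int) (n : Nat) (i : Nat) (r : Int) :
    ((i : Int) ≤ reachAux elig n r) ↔ (i ≤ n ∧ ∀ k : Nat, k < i → (r + (k : Int)) ∈ elig) := by
  induction n generalizing i r with
  | zero =>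
    simp only [reachAux]
    constructor
    · intro h
      have : i = 0 := by omega
      subst this; exact ⟨Nat.le_refl _, by omega⟩
    · intro ⟨h1, _⟩
      have : i = 0 := by omega
      simp [this]
  | succ m ih =>
    simp only [reachAux]
    by_cases hr : r ∈ elig
    · simp only [if_pos hr]
      cases i with
      | zero =>
        have := reachAux_nonneg elig m (r+1)
        constructor
        · intro _; exact ⟨by omega, by omega⟩
        · intro _; omega
      | succ p =>
        have hiff := ih p (r+1)
        constructor
        · intro h
          have hp : (p : Int) ≤ reachAux elig m (r+1) := by push_cast at h ⊢; omega
          obtain ⟨h1, h2⟩ := hiff.mp hp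
          refine ⟨by omega, ?_⟩
          intro k hk
          cases k with
          | zero => simpa using hr
          | succ q =>
            have := h2 q (by omega)
            have heq : r + ((q+1 : Nat) : Int) = r + 1 + (q : Int) := by push_cast; ring
            rw [heq]; exact this
        · intro ⟨h1, h2⟩
          have hp : (p : Int) ≤ reachAux elig m (r+1) := by
            apply hiff.mpr
            refine ⟨by omega, ?_⟩
            intro k hk
            have := h2 (k+1) (by omega)
            have heq : r + ((k+1 : Nat) : Int) = r + 1 + (k : Int) := by push_cast; ring
            rw [heq] at this; exact this
          push_cast; omega
    · simp only [if_neg hr]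
      constructor
      · intro h
        have : i = 0 := by omega
        subst this; exact ⟨by omega, by omega⟩
      · intro ⟨_, h2⟩
        rcases Nat.eq_zero_or_pos i with h0 | h0
        · simp [h0]
        · exfalso; exact hr (by simpa using h2 0 h0)

-- the run-building countdown fold computes reach for every rank above 2
theorem run_fold_getD (elig : List Int) :
    ∀ (n : Nat) (a : Int) (d : PySem.Dict Int Int), a = 2 + (n : Int) → a ≤ 24 →
    (∀ r, a < r → d.getD r 0 = reach elig r) →
    (∀ r, r ≤ a → d.getD r 0 = 0) →
    ∀ j, 2 < j →
      ((PySem.List.pyRange a 2 (-1)).foldl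
        (fun run r => if r ∈ elig then run.insert r (run.getD (r + 1) 0 + 1) else run) d).getD j 0
      = reach elig j := by
  intro n
  induction n with
  | zero =>
    intro a d ha _ hhi _ j hj
    rw [PySem.List.pyRange_neg_one_eq_nil (by omega)]
    exact hhi j (by omega)
  | succ m ih =>
    intro a d ha hle hhi hlo j hj
    rw [PySem.List.pyRange_neg_one_cons (by omega)]
    simp only [List.foldl_cons]
    by_cases hmem : a ∈ elig
    · simp only [if_pos hmem]
      apply ih (a - 1) _ (by omega) (by omega)
      · intro r hr
        by_cases hra : r = a
        · subst hra
          rw [PySem.Dict.getD_insert_self]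
          rw [hhi (r+1) (by omega), reach_unfold elig r hle, if_pos hmem]
        · rw [PySem.Dict.getD_insert_of_ne (hne := hra)]
          exact hhi r (by omega)
      · intro r hr
        rw [PySem.Dict.getD_insert_of_ne (hne := by omega)]
        exact hlo r (by omega)
      · omega
    · simp only [if_neg hmem]
      apply ih (a - 1) _ (by omega) (by omega)
      · intro r hr
        by_cases hra : r = a
        · subst hra
          rw [hlo r le_rfl, reach_unfold elig r hle, if_neg hmem]
        · exact hhi r (by omega)
      · intro r hr
        exact hlo r (by omega)
      · omega

-- A's flag loop returns true iff every required rank is present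
theorem foldl_guard {P : Int → Prop} [DecidablePred P] (l : List Int) (b : Bool) :
    (l.foldl (fun flag k => if ¬ P k then false else flag) b) = true ↔
    (b = true ∧ ∀ x ∈ l, P x) := by
  induction l generalizing b with
  | nil => simp
  | cons x t ih =>
    simp only [List.foldl_cons, List.mem_cons]
    by_cases hx : P x
    · rw [if_neg (by simpa using hx)]
      rw [ih]
      constructor
      · rintro ⟨hb, h⟩
        exact ⟨hb, by rintro y (rfl | hy); exact hx; exact h y hy⟩
      · rintro ⟨hb, h⟩
        exact ⟨hb, fun y hy => h y (Or.inr hy)⟩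
    · rw [if_pos (by simpa using hx)]
      rw [ih]
      constructor
      · rintro ⟨hb, _⟩; exact absurd hb (by simp)
      · rintro ⟨_, h⟩; exact absurd (h x (Or.inl rfl)) hx

-- the decision at each (i, j) is the same in both programs
theorem cond_iff (keys : List Int) (i j : Int)
    (hi1 : 3 ≤ i) (hi2 : i ≤ 10) (hj1 : 3 ≤ j) (hj2 : j ≤ 15) :
    (((PySem.List.pyRange 24 2 (-1)).foldl
      (fun run r => if r ∈ keys then run.insert r (run.getD (r + 1) 0 + 1) else run)
      (PySem.Dict.empty : PySem.Dict Int Int)).getD j 0 ≥ i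
      ↔ ∀ x : Int, 0 ≤ x → x < i → (j + x) ∈ keys) := by
  have hrun : ((PySem.List.pyRange 24 2 (-1)).foldl
      (fun run r => if r ∈ keys then run.insert r (run.getD (r + 1) 0 + 1) else run)
      (PySem.Dict.empty : PySem.Dict Int Int)).getD j 0 = reach keys j := by
    apply run_fold_getD keys 22 24 PySem.Dict.empty (by norm_num) (by norm_num)
    · intro r hr
      rw [PySem.Dict.getD_empty, reach_eq_zero_of_gt keys r hr]
    · intro r _
      exact PySem.Dict.getD_empty _ _
    · omega
  constructor
  · intro hge x hx0 hxi
    rw [ge_iff_le, hrun] at hge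
    unfold reach at hge
    have h1 : (i.toNat : Int) ≤ reachAux keys (25 - j).toNat j := by omega
    obtain ⟨_, h2⟩ := (reachAux_ge_iff keys _ i.toNat j).mp h1
    have := h2 x.toNat (by omega)
    rwa [Int.toNat_of_nonneg hx0] at this
  · intro h
    rw [ge_iff_le, hrun]
    unfold reach
    have h1 : (i.toNat : Int) ≤ reachAux keys (25 - j).toNat j := by
      apply (reachAux_ge_iff keys _ i.toNat j).mpr
      exact ⟨by omega, fun k hk => h k (by omega) (by omega)⟩
    omega

-- ===== VERDICT (by name: the statement is the Claim_ definition above) =====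
theorem get_shuangshun_spec : Claim_equal_get_shuangshun := by
  intro poker _
  unfold Spec_get_shuangshun get_shuangshun get_shuangshun_alt
  simp only []
  set d := PySem.Dict.ofList poker with hd
  have hkeys : d.keys.foldl
      (fun ks key => if key ≠ 15 ∧ d.getD key 0 ≥ 2 then ks ++ [key] else ks) []
      = d.keys.filter (fun k => decide (k ≠ 15 ∧ d.getD k 0 ≥ 2)) := by
    rw [PySem.List.foldl_append_ite_eq_filter]
    simp
  rw [hkeys]
  set keys := d.keys.filter (fun k => decide (k ≠ 15 ∧ d.getD k 0 ≥ 2)) with hk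
  have hset : ∀ x : Int, x ∈ PySem.Set.ofList keys ↔ x ∈ keys := by
    intro x; exact PySem.Set.mem_ofList (y := x) (xs := keys)
  -- replace Set.ofList keys by keys inside B's run fold (membership is all it uses)
  have hrunEq : (PySem.List.pyRange 24 2 (-1)).foldl
      (fun run r => if r ∈ PySem.Set.ofList keys then run.insert r (run.getD (r + 1) 0 + 1) else run)
      (PySem.Dict.empty : PySem.Dict Int Int)
      = (PySem.List.pyRange 24 2 (-1)).foldl
      (fun run r => if r ∈ keys then run.insert r (run.getD (r + 1) 0 + 1) else run)
      (PySem.Dict.empty : PySem.Dict Int Int) := by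
    apply PySem.List.foldl_congr_mem
    intro acc x _
    by_cases hx : x ∈ keys
    · rw [if_pos ((hset x).mpr hx), if_pos hx]
    · rw [if_neg (fun h => hx ((hset x).mp h)), if_neg hx]
  rw [hrunEq]
  apply PySem.List.foldl_congr_mem
  intro acc i hi
  apply PySem.List.foldl_congr_mem
  intro acc2 j hj
  rw [PySem.List.mem_pyRange_one] at hi hj
  have hcond := cond_iff keys i j (by omega) (by omega) (by omega) (by omega)
  have hflag : ((PySem.List.pyRange 0 i 1).foldl
      (fun flag k => if ¬ ((j + k) ∈ keys) then false else flag) true = true)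
      ↔ ((PySem.List.pyRange 24 2 (-1)).foldl
      (fun run r => if r ∈ keys then run.insert r (run.getD (r + 1) 0 + 1) else run)
      PySem.Dict.empty).getD j 0 ≥ i := by
    rw [foldl_guard]
    rw [hcond]
    constructor
    · intro ⟨_, h⟩ x hx0 hxi
      exact h x (by rw [PySem.List.mem_pyRange_one]; omega)
    · intro h
      refine ⟨rfl, ?_⟩
      intro x hx
      rw [PySem.List.mem_pyRange_one] at hx
      exact h x (by omega) (by omega)
  have htemp : (PySem.List.pyRange 0 i 1).foldl (fun temp x => temp ++ [x + j, x + j]) []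
      = (PySem.List.pyRange 0 i 1).flatMap (fun k => [j + k, j + k]) := by
    rw [PySem.List.foldl_append_eq_flatMap (g := fun x => [x + j, x + j])]
    simp only [List.nil_append]
    apply List.flatMap_congr
    intro x _
    simp [Int.add_comm]
  by_cases hc : ((PySem.List.pyRange 24 2 (-1)).foldl
      (fun run r => if r ∈ keys then run.insert r (run.getD (r + 1) 0 + 1) else run)
      PySem.Dict.empty).getD j 0 ≥ i
  · rw [if_pos (hflag.mpr hc), if_pos hc, htemp]
  · rw [if_neg (fun h => hc (hflag.mp h)), if_neg hc]
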